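-- pv_equiv track=rewrite | github.com/muskasaid02/csc349practice | main.py | max_total_profit
-- ===== SOURCE A (Python) =====
-- def max_total_profit(locations, profits, k):
--     n = len(locations)
--     dp = [0] * (n + 1)
--
--     # Preprocess: remove locations where distance < k
--     filtered_locations = [(locations[i], profits[i]) for i in range(n) if locations[i] >= k]
--     if not filtered_locations:
--         return 0
--
--     locations, profits = zip(*filtered_locations)
--     n = len(locations)
--
--     # Initialize DP array
--     dp = [0] * (n + 1)
--
--     # Fill the DP table using the recursive formula
--     for i in range(1, n + 1):
--         max_profit = 0
--         for j in range(i):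
--             if locations[i - 1] - locations[j - 1] > k:
--                 max_profit = max(max_profit, dp[j])
--         dp[i] = profits[i - 1] + max_profit
--
--     # The cell that holds the solution
--     return max(dp)
-- ===== SOURCE B (Python) =====
-- def max_total_profit(locations, profits, k):
--     # Same DP, but online prefix-max queries served by a recursive segment tree
--     # over the coordinate-compressed location values.
--     pts = [(l, p) for l, p in zip(locations, profits) if l >= k]
--     if not pts:
--         return 0
--     # sorted distinct locations
--     xs = sorted(set(l for l, _ in pts))
--     m = len(xs)
--
--     def bl(t):
--         # number of elements of xs that are < t (bisect_left)
--         lo, hi = 0, m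
--         while lo < hi:
--             mid = (lo + hi) // 2
--             if xs[mid] < t:
--                 lo = mid + 1
--             else:
--                 hi = mid
--         return lo
--
--     # perfect segment tree of 2**d leaves, max, all stored values >= 0
--     d = 0
--     while (1 << d) < m:
--         d += 1
--     # tree node = (value, left, right) ; leaf = value
--     def build(h):
--         if h == 0:
--             return 0
--         sub = build(h - 1)
--         return (0, sub, sub)
--
--     def update(node, h, pos, v):
--         if h == 0:
--             return max(node, v)
--         val, lt, rt = node
--         half = 1 << (h - 1)
--         if pos < half:
--             lt = update(lt, h - 1, pos, v)
--         else:
--             rt = update(rt, h - 1, pos - half, v)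
--         lv = lt if h == 1 else lt[0]
--         rv = rt if h == 1 else rt[0]
--         return (max(lv, rv), lt, rt)
--
--     def query(node, h, r):
--         # max of leaves [0, r) together with 0
--         if r <= 0:
--             return 0
--         if h == 0:
--             return node
--         val, lt, rt = node
--         half = 1 << (h - 1)
--         if r >= 1 << h:
--             return val
--         if r <= half:
--             return query(lt, h - 1, r)
--         lv = lt if h == 1 else lt[0]
--         return max(lv, query(rt, h - 1, r - half))
--
--     tree = build(d)
--     ans = 0
--     for l, p in pts:
--         dp = p + query(tree, d, bl(l - k))
--         ans = max(ans, dp)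
--         tree = update(tree, d, bl(l), dp)
--     return ans
-- ===== Notes on version B (the rewrite author's own statement) =====
-- stated objective: alternative
-- what changed: A's nested scan of all earlier dp values is replaced by online prefix-max queries on a recursive segment tree over the coordinate-compressed (sorted, deduplicated) location values, with binary search for the compression rank.
import Mathlib
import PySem

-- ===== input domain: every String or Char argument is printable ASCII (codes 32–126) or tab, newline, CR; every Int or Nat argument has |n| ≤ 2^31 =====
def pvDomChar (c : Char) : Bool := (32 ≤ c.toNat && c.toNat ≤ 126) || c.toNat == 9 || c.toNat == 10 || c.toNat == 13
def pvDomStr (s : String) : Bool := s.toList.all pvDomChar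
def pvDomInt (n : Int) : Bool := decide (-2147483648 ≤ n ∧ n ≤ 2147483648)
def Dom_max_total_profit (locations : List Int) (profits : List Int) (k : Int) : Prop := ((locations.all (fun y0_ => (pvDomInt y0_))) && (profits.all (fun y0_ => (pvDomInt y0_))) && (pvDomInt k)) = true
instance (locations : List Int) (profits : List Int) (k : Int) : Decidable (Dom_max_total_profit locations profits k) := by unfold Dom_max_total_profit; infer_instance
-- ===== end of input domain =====

-- B replaces A's nested inner scan of earlier dp values by online prefix-max queries
-- on a segment tree over the coordinate-compressed locations (objective: alternative).

-- ===== PORT A =====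
-- literal transliteration of A; pyGetD is exact here: every index is in range on
-- inputs admitted by Pre_max_total_profit (out-of-range profits accesses = IndexError are excluded)
def max_total_profit (locations : List Int) (profits : List Int) (k : Int) : Int :=
  let n : Int := locations.length
  -- filtered_locations = [(locations[i], profits[i]) for i in range(n) if locations[i] >= k]
  let filtered : List (Int × Int) :=
    (PySem.List.pyRange 0 n 1).foldl (fun acc i =>
      if PySem.List.pyGetD locations i 0 ≥ k then
        acc ++ [(PySem.List.pyGetD locations i 0, PySem.List.pyGetD profits i 0)]
      else acc) []
  if filtered = [] then 0
  else
    -- locations, profits = zip(*filtered_locations)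
    let locs := filtered.map Prod.fst
    let profs := filtered.map Prod.snd
    let n2 : Int := filtered.length
    let dp0 : List Int := List.replicate (filtered.length + 1) 0
    let dp := (PySem.List.pyRange 1 (n2 + 1) 1).foldl (fun dp i =>
      let mp := (PySem.List.pyRange 0 i 1).foldl (fun mp j =>
        if PySem.List.pyGetD locs (i - 1) 0 - PySem.List.pyGetD locs (j - 1) 0 > k then
          max mp (PySem.List.pyGetD dp j 0)
        else mp) 0
      PySem.List.pySetD dp i (PySem.List.pyGetD profs (i - 1) 0 + mp)) dp0
    -- max(dp): dp is nonempty, so max? is some; the none branch is unreachable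
    match PySem.List.max? dp (fun x => x) with
    | some v => v
    | none => 0

-- ===== PORT B =====
-- B-side helpers (transliterations of the helpers in Source B)
-- bl: number of elements of xs that are < t, by binary search (lo, hi are list
-- indices, always ≥ 0, so Nat arithmetic matches Python's; (lo+hi)//2 on Nats is Nat division)
def pvBlGo (xs : List Int) (t : Int) (lo hi : Nat) : Nat :=
  if _h : lo < hi then
    let mid := (lo + hi) / 2
    if xs.getD mid 0 < t then pvBlGo xs t (mid + 1) hi else pvBlGo xs t lo mid
  else lo
termination_by hi - lo
decreasing_by all_goals omega

def pvBl (xs : List Int) (t : Int) : Nat := pvBlGo xs t 0 xs.length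

-- while (1 << d) < m: d += 1
def pvDepth (m d : Nat) : Nat :=
  if 2 ^ d < m then pvDepth m (d + 1) else d
termination_by m - 2 ^ d
decreasing_by
  have : 2 ^ d < 2 ^ (d + 1) := Nat.pow_lt_pow_succ (by norm_num)
  omega

-- python's tree value: a leaf is a bare int, a node a (max, left, right) triple
inductive PvSeg : Type where
  | leaf : Int → PvSeg
  | node : Int → PvSeg → PvSeg → PvSeg
deriving DecidableEq, Repr

-- 'lt if h == 1 else lt[0]' — the stored value at the root of a subtree
def pvRoot : PvSeg → Int
  | .leaf v => v
  | .node v _ _ => v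

def pvBuild : Nat → PvSeg
  | 0 => .leaf 0
  | h + 1 => let sub := pvBuild h; .node 0 sub sub

def pvUpdate (t : PvSeg) (h pos : Nat) (v : Int) : PvSeg :=
  match t with
  | .leaf w => .leaf (max w v)
  | .node _ lt rt =>
    let half := 2 ^ (h - 1)
    if pos < half then
      let lt' := pvUpdate lt (h - 1) pos v
      .node (max (pvRoot lt') (pvRoot rt)) lt' rt
    else
      let rt' := pvUpdate rt (h - 1) (pos - half) v
      .node (max (pvRoot lt) (pvRoot rt')) lt rt'

-- query(node, h, r): max of leaves [0, r) together with 0 (r ≥ 0 always in Source B, so Nat)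
def pvQuery (t : PvSeg) (h : Nat) (r : Nat) : Int :=
  if r = 0 then 0
  else
    match t with
    | .leaf w => w
    | .node v lt rt =>
      if 2 ^ h ≤ r then v
      else
        let half := 2 ^ (h - 1)
        if r ≤ half then pvQuery lt (h - 1) r
        else max (pvRoot lt) (pvQuery rt (h - 1) (r - half))

def max_total_profit_alt (locations : List Int) (profits : List Int) (k : Int) : Int :=
  let pts := (locations.zip profits).filter (fun lp => lp.1 ≥ k)
  if pts = [] then 0
  else
    let xs := PySem.List.sorted (PySem.Set.ofList (pts.map Prod.fst)) (fun x => x) false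
    let d := pvDepth xs.length 0
    let st := pts.foldl (fun (st : PvSeg × Int) lp =>
      let dp := lp.2 + pvQuery st.1 d (pvBl xs (lp.1 - k))
      let ans := max st.2 dp
      (pvUpdate st.1 d (pvBl xs lp.1) dp, ans)) (pvBuild d, 0)
    st.2

-- ===== PRECONDITION & SPEC =====
-- Pre_ excludes exactly the inputs where A raises IndexError: a location at an
-- index ≥ len(profits) that passes the 'locations[i] >= k' filter makes A access profits[i].
def Pre_max_total_profit (locations : List Int) (profits : List Int) (k : Int) : Prop :=
  ∀ x ∈ locations.drop profits.length, x < k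
instance (locations : List Int) (profits : List Int) (k : Int) : Decidable (Pre_max_total_profit locations profits k) := by unfold Pre_max_total_profit; infer_instance

def pvWitness_max_total_profit : List Int × List Int × Int := ([3, 9, 1], [5, 2, 7], 1)

def Spec_max_total_profit (locations : List Int) (profits : List Int) (k : Int) (out : Int) : Prop := out = max_total_profit_alt locations profits k
instance (locations : List Int) (profits : List Int) (k : Int) (out : Int) : Decidable (Spec_max_total_profit locations profits k out) := by unfold Spec_max_total_profit; infer_instance

-- ===== CLAIM (what is proved, stated in full; the proofs are below) =====
def Claim_equal_max_total_profit : Prop := ∀ (locations : List Int) (profits : List Int) (k : Int), Dom_max_total_profit locations profits k → Pre_max_total_profit locations profits k → Spec_max_total_profit locations profits k (max_total_profit locations profits k)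

-- ===== LEMMAS AND PROOFS =====

-- Both programs compute the same dp values; the common reference below processes the
-- filtered (location, profit) pairs in order, pairing each with its dp value.

-- running max with base 0 (the shape of both programs' accumulators)
def pvMaxP (l : List Int) : Int := l.foldl max 0

def pvStep (k : Int) (q : List (Int × Int)) (e : Int × Int) : List (Int × Int) :=
  q ++ [(e.1, e.2 + pvMaxP ((q.filter (fun x => e.1 - x.1 > k)).map Prod.snd))]

def pvProcs (k : Int) (pts : List (Int × Int)) : List (Int × Int) :=
  pts.foldl (pvStep k) []

lemma pvMaxP_nonneg (l : List Int) : 0 ≤ pvMaxP l := (PySem.List.le_foldl_max l 0).1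

lemma le_pvMaxP {l : List Int} {y : Int} (h : y ∈ l) : y ≤ pvMaxP l :=
  (PySem.List.le_foldl_max l 0).2 y h

lemma pvMaxP_le {l : List Int} {b : Int} (h0 : 0 ≤ b) (h : ∀ y ∈ l, y ≤ b) : pvMaxP l ≤ b := by
  rcases PySem.List.foldl_max_mem l 0 with h1 | h1
  · rw [pvMaxP, h1]; exact h0
  · exact h _ h1

lemma pvMaxP_eq_of {l1 l2 : List Int} (h1 : ∀ y ∈ l1, y ≤ pvMaxP l2) (h2 : ∀ y ∈ l2, y ≤ pvMaxP l1) :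
    pvMaxP l1 = pvMaxP l2 :=
  le_antisymm (pvMaxP_le (pvMaxP_nonneg _) h1) (pvMaxP_le (pvMaxP_nonneg _) h2)

lemma pvMaxP_append (l1 l2 : List Int) : pvMaxP (l1 ++ l2) = max (pvMaxP l1) (pvMaxP l2) := by
  apply le_antisymm
  · refine pvMaxP_le (le_max_of_le_left (pvMaxP_nonneg _)) ?_
    intro y hy
    rcases List.mem_append.1 hy with h | h
    · exact le_max_of_le_left (le_pvMaxP h)
    · exact le_max_of_le_right (le_pvMaxP h)
  · refine max_le (pvMaxP_le (pvMaxP_nonneg _) ?_) (pvMaxP_le (pvMaxP_nonneg _) ?_)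
    · exact fun y hy => le_pvMaxP (List.mem_append_left _ hy)
    · exact fun y hy => le_pvMaxP (List.mem_append_right _ hy)

lemma pvMaxP_concat (l : List Int) (x : Int) : pvMaxP (l ++ [x]) = max (pvMaxP l) x := by
  simp [pvMaxP, List.foldl_append]

-- the conditional running max IS the max over the filtered projection
lemma pvFoldl_if_max {α : Type} (c : α → Prop) [DecidablePred c] (f : α → Int) (q : List α) :
    ∀ a : Int, q.foldl (fun m e => if c e then max m (f e) else m) a
      = List.foldl max a ((q.filter (fun e => c e)).map f) := by
  induction q with
  | nil => intro a; simp
  | cons e q ih =>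
    intro a
    by_cases h : c e <;> simp [h, ih]

lemma pvProcs_concat (k : Int) (s : List (Int × Int)) (e : Int × Int) :
    pvProcs k (s ++ [e]) = pvStep k (pvProcs k s) e := by
  simp [pvProcs, List.foldl_append]

lemma pvProcs_fst (k : Int) (pts : List (Int × Int)) :
    (pvProcs k pts).map Prod.fst = pts.map Prod.fst := by
  suffices h : ∀ (s : List (Int × Int)) (q : List (Int × Int)),
      ((s.foldl (pvStep k) q).map Prod.fst) = q.map Prod.fst ++ s.map Prod.fst by
    simpa using h pts []
  intro s
  induction s with
  | nil => simp
  | cons e s ih =>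
    intro q
    simp [pvStep, ih]

lemma pvProcs_length (k : Int) (pts : List (Int × Int)) :
    (pvProcs k pts).length = pts.length := by
  have := congrArg List.length (pvProcs_fst k pts)
  simpa using this

-- ----- A side -----

-- A's filtering pass equals the zip-filter of B (Pre_ makes profits[i] in range whenever read)
lemma pvAfilter (locs profs : List Int) (k : Int)
    (hpre : ∀ x ∈ locs.drop profs.length, x < k) :
    (PySem.List.pyRange 0 (locs.length : Int) 1).foldl (fun acc i =>
      if PySem.List.pyGetD locs i 0 ≥ k then
        acc ++ [(PySem.List.pyGetD locs i 0, PySem.List.pyGetD profs i 0)]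
      else acc) [] = (locs.zip profs).filter (fun lp => lp.1 ≥ k) := by
  suffices h : ∀ t : Nat, t ≤ locs.length →
      (PySem.List.pyRange 0 (t : Int) 1).foldl (fun acc i =>
        if PySem.List.pyGetD locs i 0 ≥ k then
          acc ++ [(PySem.List.pyGetD locs i 0, PySem.List.pyGetD profs i 0)]
        else acc) [] = ((locs.zip profs).take t).filter (fun lp => lp.1 ≥ k) by
    have h2 := h locs.length le_rfl
    rwa [List.take_of_length_le (by rw [List.length_zip]; omega)] at h2
  intro t
  induction t with
  | zero => intro _; simp [PySem.List.pyRange_one_eq_nil]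
  | succ t ih =>
    intro ht
    have hcast : ((t + 1 : Nat) : Int) = (t : Int) + 1 := by push_cast; ring
    rw [hcast, PySem.List.pyRange_one_succ_right (by positivity), List.foldl_append,
      ih (by omega), List.foldl_cons, List.foldl_nil, PySem.List.pyGetD_natCast,
      PySem.List.pyGetD_natCast, List.take_add_one]
    by_cases ht2 : t < (locs.zip profs).length
    · have htl : t < locs.length := by rw [List.length_zip] at ht2; omega
      have htp : t < profs.length := by rw [List.length_zip] at ht2; omega
      rw [List.getElem?_eq_getElem ht2, List.getElem_zip]
      simp only [Option.toList_some, List.filter_append, List.getD_eq_getElem _ _ htl,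
        List.getD_eq_getElem _ _ htp]
      by_cases hk : locs[t] ≥ k
      · rw [if_pos hk]
        simp [hk]
      · rw [if_neg hk]
        simp [hk]
    · have htl : t < locs.length := by omega
      have htp : profs.length ≤ t := by rw [List.length_zip] at ht2; omega
      have hmem : locs[t] ∈ locs.drop profs.length := by
        have hlt : t - profs.length < (locs.drop profs.length).length := by
          rw [List.length_drop]; omega
        have heq : (locs.drop profs.length)[t - profs.length] = locs[t] := by
          rw [List.getElem_drop]; congr 1; omega
        rw [← heq]
        exact List.getElem_mem hlt
      have hk : ¬ (locs.getD t 0 ≥ k) := by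
        rw [List.getD_eq_getElem _ _ htl]
        have := hpre _ hmem
        omega
      rw [if_neg hk, List.getElem?_eq_none (by omega)]
      simp

-- A's inner loop over j ∈ [1, |q|+1) reads exactly the processed pairs q
lemma pvInner (k L : Int) (locs dpl : List Int) (q : List (Int × Int))
    (hf : ∀ j (h : j < q.length), locs.getD j 0 = (q[j]).1)
    (hd : ∀ j (h : j < q.length), dpl.getD (j + 1) 0 = (q[j]).2) :
    ∀ a : Int, (PySem.List.pyRange 1 ((q.length : Int) + 1) 1).foldl (fun mp j =>
        if L - PySem.List.pyGetD locs (j - 1) 0 > k then max mp (PySem.List.pyGetD dpl j 0) else mp) a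
      = q.foldl (fun mp e => if L - e.1 > k then max mp e.2 else mp) a := by
  revert hf hd
  induction q using List.reverseRecOn with
  | nil => intro _ _ a; simp [PySem.List.pyRange_one_eq_nil]
  | append_singleton q e ih =>
    intro hf hd a
    have hlen2 : (q ++ [e]).length = q.length + 1 := by simp
    have hlen : (((q ++ [e]).length : Nat) : Int) + 1 = ((q.length : Int) + 1) + 1 := by
      rw [hlen2]; push_cast; ring
    rw [hlen, PySem.List.pyRange_one_succ_right (by omega), List.foldl_append,
      List.foldl_append]
    have hf' : ∀ j (h : j < q.length), locs.getD j 0 = (q[j]).1 := by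
      intro j hj
      rw [hf j (by omega)]
      exact congrArg Prod.fst (List.getElem_append_left hj)
    have hd' : ∀ j (h : j < q.length), dpl.getD (j + 1) 0 = (q[j]).2 := by
      intro j hj
      rw [hd j (by omega)]
      exact congrArg Prod.snd (List.getElem_append_left hj)
    rw [ih hf' hd']
    simp only [List.foldl_cons, List.foldl_nil]
    have h1 : ((q.length : Int) + 1) - 1 = (q.length : Int) := by ring
    have hfq := hf q.length (by omega)
    have hdq := hd q.length (by omega)
    have he : (q ++ [e])[q.length]'(by omega) = e := List.getElem_concat_length rfl (by omega)
    rw [he] at hfq hdq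
    have hc2 : ((q.length : Int) + 1) = ((q.length + 1 : Nat) : Int) := by push_cast; ring
    rw [h1, PySem.List.pyGetD_natCast, hfq, hc2, PySem.List.pyGetD_natCast, hdq]

-- A's dp array after the first t outer iterations
lemma pvAouter (k : Int) (pts : List (Int × Int)) (t : Nat) :
    t ≤ pts.length →
    (PySem.List.pyRange 1 ((t : Int) + 1) 1).foldl (fun dp i =>
        let mp := (PySem.List.pyRange 0 i 1).foldl (fun mp j =>
          if PySem.List.pyGetD (pts.map Prod.fst) (i - 1) 0 - PySem.List.pyGetD (pts.map Prod.fst) (j - 1) 0 > k then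
            max mp (PySem.List.pyGetD dp j 0)
          else mp) 0
        PySem.List.pySetD dp i (PySem.List.pyGetD (pts.map Prod.snd) (i - 1) 0 + mp))
      (List.replicate (pts.length + 1) 0)
    = 0 :: (pvProcs k (pts.take t)).map Prod.snd ++ List.replicate (pts.length - t) 0 := by
  induction t with
  | zero =>
    intro _
    simp [PySem.List.pyRange_one_eq_nil, pvProcs, List.replicate_succ]
  | succ t ih =>
    intro ht
    have ht' : t < pts.length := by omega
    have hcast : ((t + 1 : Nat) : Int) + 1 = ((t : Int) + 1) + 1 := by push_cast; ring
    rw [hcast, PySem.List.pyRange_one_succ_right (by omega), List.foldl_append, ih (by omega)]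
    simp only [List.foldl_cons, List.foldl_nil]
    -- abbreviations for the state after t steps
    set q := pvProcs k (pts.take t) with hq
    have hqlen : q.length = t := by
      rw [hq, pvProcs_length, List.length_take]; omega
    have hqfst : q.map Prod.fst = (pts.take t).map Prod.fst := by
      rw [hq, pvProcs_fst]
    -- the location read by the outer step
    have hL : PySem.List.pyGetD (pts.map Prod.fst) (((t : Int) + 1) - 1) 0 = (pts[t]).1 := by
      have h1 : ((t : Int) + 1) - 1 = ((t : Nat) : Int) := by ring
      rw [h1, PySem.List.pyGetD_natCast, List.getD_eq_getElem _ _ (by simpa using ht'),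
        List.getElem_map]
    -- the inner loop: the j = 0 step contributes nothing, the rest reads q
    have hinner : ∀ dpl : List Int, dpl.getD 0 0 = 0 →
        (∀ j (h : j < q.length), dpl.getD (j + 1) 0 = (q[j]).2) →
        (PySem.List.pyRange 0 ((t : Int) + 1) 1).foldl (fun mp j =>
          if PySem.List.pyGetD (pts.map Prod.fst) (((t : Int) + 1) - 1) 0 - PySem.List.pyGetD (pts.map Prod.fst) (j - 1) 0 > k then
            max mp (PySem.List.pyGetD dpl j 0)
          else mp) 0
        = pvMaxP ((q.filter (fun x => (pts[t]).1 - x.1 > k)).map Prod.snd) := by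
      intro dpl h0 hdl
      rw [PySem.List.pyRange_one_append 0 1 ((t : Int) + 1) (by omega) (by omega)]
      have hsing : PySem.List.pyRange 0 1 1 = [0] := by decide
      rw [hsing, List.foldl_append, List.foldl_cons, List.foldl_nil]
      have h00 : PySem.List.pyGetD dpl 0 0 = 0 := by
        rw [PySem.List.pyGetD_zero, h0]
      have hstep0 : (if PySem.List.pyGetD (pts.map Prod.fst) (((t : Int) + 1) - 1) 0 - PySem.List.pyGetD (pts.map Prod.fst) (0 - 1) 0 > k then
            max 0 (PySem.List.pyGetD dpl 0 0) else 0) = 0 := by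
        rw [h00]; split <;> simp
      rw [hstep0]
      have hfl : ∀ j (h : j < q.length), (pts.map Prod.fst).getD j 0 = (q[j]).1 := by
        intro j hj
        have hjt : j < t := by omega
        have hjp : j < pts.length := by omega
        rw [List.getD_eq_getElem _ _ (by simpa using hjp), List.getElem_map]
        have h2 : (q[j]).1 = ((q.map Prod.fst)[j]'(by simpa using hj)) := by
          rw [List.getElem_map]
        rw [h2]
        have h3 : ((q.map Prod.fst)[j]'(by simpa using hj)) = (((pts.take t).map Prod.fst)[j]'(by simp [List.length_take]; omega)) := by
          simp only [hqfst]
        rw [h3, List.getElem_map, List.getElem_take]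
      have hcq : ((t : Int) + 1) = ((q.length : Int) + 1) := by rw [hqlen]
      rw [hL, hcq, pvInner k (pts[t]).1 (pts.map Prod.fst) dpl q hfl hdl 0]
      rw [pvFoldl_if_max (fun x : Int × Int => (pts[t]).1 - x.1 > k) Prod.snd q 0]
      rfl
    -- the dp list before this step
    have hdl0 : (0 :: q.map Prod.snd ++ List.replicate (pts.length - t) 0).getD 0 0 = 0 := by
      simp
    have hdl : ∀ j (h : j < q.length), (0 :: q.map Prod.snd ++ List.replicate (pts.length - t) 0).getD (j + 1) 0 = (q[j]).2 := by
      intro j hj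
      rw [List.getD_append _ _ _ _ (by simp; omega), List.getD_cons_succ,
        List.getD_eq_getElem _ _ (by simpa using hj), List.getElem_map]
    rw [hinner _ hdl0 hdl]
    -- the store dp[t+1] = profits[t] + mp
    have hP : PySem.List.pyGetD (pts.map Prod.snd) (((t : Int) + 1) - 1) 0 = (pts[t]).2 := by
      have h1 : ((t : Int) + 1) - 1 = ((t : Nat) : Int) := by ring
      rw [h1, PySem.List.pyGetD_natCast, List.getD_eq_getElem _ _ (by simpa using ht'),
        List.getElem_map]
    have hc1 : ((t : Int) + 1) = ((t + 1 : Nat) : Int) := by push_cast; ring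
    rw [hP, hc1, PySem.List.pySetD_natCast]
    -- performing the set
    have hrep : List.replicate (pts.length - t) (0 : Int) = 0 :: List.replicate (pts.length - (t + 1)) 0 := by
      have h2 : pts.length - t = (pts.length - (t + 1)) + 1 := by omega
      rw [h2, List.replicate_succ]
    rw [List.set_append_right _ _ (by simp [hqlen]), hrep]
    simp only [List.length_cons, List.length_map, hqlen, Nat.sub_self, List.set_cons_zero]
    -- the new processed list
    have htake : pts.take (t + 1) = pts.take t ++ [pts[t]] := by
      rw [List.take_add_one, List.getElem?_eq_getElem ht']
      rfl
    rw [htake, pvProcs_concat, ← hq]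
    simp [pvStep]

lemma pvA_eq (locations profits : List Int) (k : Int)
    (hpre : ∀ x ∈ locations.drop profits.length, x < k) :
    max_total_profit locations profits k =
      (if (locations.zip profits).filter (fun lp => lp.1 ≥ k) = [] then 0
       else pvMaxP ((pvProcs k ((locations.zip profits).filter (fun lp => lp.1 ≥ k))).map Prod.snd)) := by
  simp only [max_total_profit]
  rw [pvAfilter locations profits k hpre]
  by_cases hemp : (locations.zip profits).filter (fun lp => lp.1 ≥ k) = []
  · rw [if_pos hemp, if_pos hemp]
  · rw [if_neg hemp, if_neg hemp]
    have houter := pvAouter k ((locations.zip profits).filter (fun lp => lp.1 ≥ k))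
      ((locations.zip profits).filter (fun lp => lp.1 ≥ k)).length le_rfl
    rw [List.take_length, Nat.sub_self, List.replicate_zero, List.append_nil] at houter
    rw [houter, PySem.List.max?_id_cons]
    rfl

-- ----- B side -----

lemma pvDepth_le (m d : Nat) : m ≤ 2 ^ pvDepth m d := by
  fun_induction pvDepth m d with
  | case1 d h ih => exact ih
  | case2 d h => omega

-- strictly sorted lists: the element at i is < t iff i is below the count of elements < t
lemma pvCount_char (xs : List Int) (hs : xs.Pairwise (· < ·)) (t : Int) (i : Nat) (hi : i < xs.length) :
    xs[i] < t ↔ i < (xs.filter (fun x => x < t)).length := by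
  rw [← List.countP_eq_length_filter]
  have hchain := List.pairwise_iff_getElem.mp hs
  constructor
  · intro h
    have hall : ∀ y ∈ xs.take (i + 1), (fun x : Int => decide (x < t)) y = true := by
      intro y hy
      rw [List.mem_take_iff_getElem] at hy
      obtain ⟨j, hj, rfl⟩ := hy
      simp only [decide_eq_true_eq]
      rcases Nat.lt_or_ge j i with hj2 | hj2
      · exact lt_trans (hchain j i (by omega) hi hj2) h
      · have : j = i := by omega
        subst this; exact h
    have htk : (xs.take (i + 1)).countP (fun x : Int => decide (x < t)) = (xs.take (i + 1)).length :=
      List.countP_eq_length.mpr hall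
    have hlen : (xs.take (i + 1)).length = i + 1 := by
      rw [List.length_take]; omega
    calc i < i + 1 := by omega
      _ = (xs.take (i + 1)).countP (fun x : Int => decide (x < t)) := by rw [htk, hlen]
      _ ≤ xs.countP (fun x : Int => decide (x < t)) := by
          conv_rhs => rw [← List.take_append_drop (i + 1) xs]
          rw [List.countP_append]; omega
  · intro h
    by_contra hno
    push Not at hno
    have hdrop : (xs.drop i).countP (fun x : Int => decide (x < t)) = 0 := by
      rw [List.countP_eq_zero]
      intro y hy
      rw [List.mem_iff_getElem] at hy
      obtain ⟨j, hj, rfl⟩ := hy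
      rw [List.getElem_drop]
      simp only [decide_eq_true_eq, not_lt]
      rcases Nat.eq_zero_or_pos j with hj0 | hj0
      · subst hj0; simpa using hno
      · have hlen : i + j < xs.length := by
          have := List.length_drop (l := xs) (i := i); omega
        exact le_trans hno (le_of_lt (hchain i (i + j) hi hlen (by omega)))
    have : xs.countP (fun x : Int => decide (x < t)) ≤ i := by
      conv_lhs => rw [← List.take_append_drop i xs]
      rw [List.countP_append, hdrop]
      have h1 : (xs.take i).countP (fun x : Int => decide (x < t)) ≤ (xs.take i).length :=
        List.countP_le_length
      rw [List.length_take] at h1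
      omega
    omega

lemma pvBlGo_eq (xs : List Int) (hs : xs.Pairwise (· < ·)) (t : Int) (lo hi : Nat) :
    hi ≤ xs.length → lo ≤ (xs.filter (fun x => x < t)).length →
    (xs.filter (fun x => x < t)).length ≤ hi →
    pvBlGo xs t lo hi = (xs.filter (fun x => x < t)).length := by
  fun_induction pvBlGo xs t lo hi with
  | case1 lo hi hlt mid hgetlt ih =>
    intro hhi hlo hc
    have hmid : mid < xs.length := by
      have : mid < hi := by simp only [mid]; omega
      omega
    have hx : xs[mid] < t := by
      rw [List.getD_eq_getElem xs 0 hmid] at hgetlt; exact hgetlt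
    have := (pvCount_char xs hs t mid hmid).mp hx
    exact ih hhi (by omega) hc
  | case2 lo hi hlt mid hgetge ih =>
    intro hhi hlo hc
    have hmid : mid < xs.length := by
      have : mid < hi := by simp only [mid]; omega
      omega
    have hcle : (xs.filter (fun x => x < t)).length ≤ mid := by
      by_contra hlt2
      push Not at hlt2
      have := (pvCount_char xs hs t mid hmid).mpr hlt2
      rw [List.getD_eq_getElem xs 0 hmid] at hgetge
      exact hgetge this
    exact ih (by omega) hlo hcle
  | case3 lo hi hge =>
    intro hhi hlo hc
    omega

lemma pvBl_eq (xs : List Int) (hs : xs.Pairwise (· < ·)) (t : Int) :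
    pvBl xs t = (xs.filter (fun x => x < t)).length :=
  pvBlGo_eq xs hs t 0 xs.length le_rfl (Nat.zero_le _) (List.length_filter_le _ _)

lemma pvBl_le (xs : List Int) (hs : xs.Pairwise (· < ·)) (t : Int) : pvBl xs t ≤ xs.length := by
  rw [pvBl_eq xs hs t]; exact List.length_filter_le _ _

lemma pvBl_char (xs : List Int) (hs : xs.Pairwise (· < ·)) (t : Int) (i : Nat) (hi : i < xs.length) :
    xs[i] < t ↔ i < pvBl xs t := by
  rw [pvBl_eq xs hs t]; exact pvCount_char xs hs t i hi

lemma pvBl_self (xs : List Int) (hs : xs.Pairwise (· < ·)) {x : Int} (hx : x ∈ xs) :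
    pvBl xs x < xs.length ∧ ∀ t : Int, (x < t ↔ pvBl xs x < pvBl xs t) := by
  obtain ⟨ix, hix, rfl⟩ := List.mem_iff_getElem.mp hx
  have hchain := List.pairwise_iff_getElem.mp hs
  have hble : pvBl xs xs[ix] ≤ ix := by
    by_contra hgt
    push Not at hgt
    exact absurd ((pvBl_char xs hs xs[ix] ix hix).mpr hgt) (lt_irrefl _)
  have hbge : ix ≤ pvBl xs xs[ix] := by
    by_contra hlt
    push Not at hlt
    have hb : pvBl xs xs[ix] < xs.length := by omega
    have := (pvBl_char xs hs xs[ix] (pvBl xs xs[ix]) hb).mp (hchain _ _ hb hix hlt)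
    omega
  have hblx : pvBl xs xs[ix] = ix := by omega
  rw [hblx]
  exact ⟨hix, fun t => pvBl_char xs hs t ix hix⟩

-- ----- segment tree semantics -----

def pvLeaves : PvSeg → List Int
  | .leaf v => [v]
  | .node _ l r => pvLeaves l ++ pvLeaves r

def pvWf : Nat → PvSeg → Prop
  | 0, .leaf v => 0 ≤ v
  | h + 1, .node v l r => pvWf h l ∧ pvWf h r ∧ v = max (pvRoot l) (pvRoot r)
  | _, _ => False

lemma pvWf_node {h : Nat} {v : Int} {l r : PvSeg} :
    pvWf (h + 1) (.node v l r) ↔ pvWf h l ∧ pvWf h r ∧ v = max (pvRoot l) (pvRoot r) := Iff.rfl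

lemma pvLeaves_length (h : Nat) (t : PvSeg) (hwf : pvWf h t) : (pvLeaves t).length = 2 ^ h := by
  induction t generalizing h with
  | leaf v =>
    cases h with
    | zero => simp [pvLeaves]
    | succ h => exact absurd hwf (by simp [pvWf])
  | node v l r ihl ihr =>
    cases h with
    | zero => exact absurd hwf (by simp [pvWf])
    | succ h =>
      obtain ⟨hl, hr, -⟩ := hwf
      simp [pvLeaves, ihl h hl, ihr h hr, pow_succ]
      ring

lemma pvRoot_build (h : Nat) : pvRoot (pvBuild h) = 0 := by
  cases h <;> simp [pvBuild, pvRoot]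

lemma pvBuild_wf (h : Nat) : pvWf h (pvBuild h) ∧ pvLeaves (pvBuild h) = List.replicate (2 ^ h) 0 := by
  induction h with
  | zero => simp [pvBuild, pvWf, pvLeaves, List.replicate]
  | succ h ih =>
    refine ⟨pvWf_node.mpr ⟨ih.1, ih.1, by rw [pvRoot_build h]; simp⟩, ?_⟩
    have h2 : 2 ^ (h + 1) = 2 ^ h + 2 ^ h := by rw [pow_succ]; ring
    show pvLeaves (pvBuild h) ++ pvLeaves (pvBuild h) = _
    rw [ih.2, h2, List.replicate_add]

lemma pvRoot_eq (h : Nat) (t : PvSeg) (hwf : pvWf h t) : pvRoot t = pvMaxP (pvLeaves t) := by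
  induction t generalizing h with
  | leaf v =>
    cases h with
    | zero =>
      simp only [pvWf] at hwf
      simp [pvRoot, pvLeaves, pvMaxP]
      omega
    | succ h => exact absurd hwf (by simp [pvWf])
  | node v l r ihl ihr =>
    cases h with
    | zero => exact absurd hwf (by simp [pvWf])
    | succ h =>
      obtain ⟨hl, hr, hv⟩ := hwf
      rw [pvRoot, hv, pvLeaves, pvMaxP_append, ihl h hl, ihr h hr]

lemma pvUpdate_eq (h : Nat) (t : PvSeg) (hwf : pvWf h t) (pos : Nat) (hpos : pos < 2 ^ h) (v : Int) :
    pvWf h (pvUpdate t h pos v) ∧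
      pvLeaves (pvUpdate t h pos v) = (pvLeaves t).set pos (max ((pvLeaves t).getD pos 0) v) := by
  induction t generalizing h pos with
  | leaf w =>
    cases h with
    | zero =>
      simp only [pvWf] at hwf
      have hp0 : pos = 0 := by simpa using hpos
      subst hp0
      refine ⟨by simp only [pvUpdate, pvWf]; omega, ?_⟩
      simp [pvUpdate, pvLeaves]
    | succ h => exact absurd hwf (by simp [pvWf])
  | node w l r ihl ihr =>
    cases h with
    | zero => exact absurd hwf (by simp [pvWf])
    | succ h =>
      obtain ⟨hl, hr, hv⟩ := pvWf_node.mp hwf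
      have hlenl : (pvLeaves l).length = 2 ^ h := pvLeaves_length h l hl
      have hh : h + 1 - 1 = h := rfl
      by_cases hc : pos < 2 ^ h
      · obtain ⟨hw', hleq⟩ := ihl h hl pos hc
        refine ⟨?_, ?_⟩
        · simp only [pvUpdate, hh, if_pos hc]
          exact pvWf_node.mpr ⟨hw', hr, rfl⟩
        · simp only [pvUpdate, hh, if_pos hc, pvLeaves, hleq]
          rw [List.set_append_left _ _ (by omega), List.getD_append _ _ _ _ (by omega)]
      · have hc2 : pos - 2 ^ h < 2 ^ h := by
          have : 2 ^ (h + 1) = 2 ^ h + 2 ^ h := by rw [pow_succ]; ring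
          omega
        obtain ⟨hw', hleq⟩ := ihr h hr (pos - 2 ^ h) hc2
        refine ⟨?_, ?_⟩
        · simp only [pvUpdate, hh, if_neg hc]
          exact pvWf_node.mpr ⟨hl, hw', rfl⟩
        · simp only [pvUpdate, hh, if_neg hc, pvLeaves, hleq]
          rw [List.set_append_right _ _ (by omega), List.getD_append_right _ _ _ _ (by omega), hlenl]

lemma pvQuery_eq (h : Nat) (t : PvSeg) (hwf : pvWf h t) (r : Nat) :
    pvQuery t h r = pvMaxP ((pvLeaves t).take r) := by
  induction t generalizing h r with
  | leaf w =>
    cases h with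
    | zero =>
      simp only [pvWf] at hwf
      rcases Nat.eq_zero_or_pos r with hr | hr
      · subst hr; simp [pvQuery, pvLeaves, pvMaxP]
      · have htake : (pvLeaves (PvSeg.leaf w)).take r = [w] := by
          simp only [pvLeaves]
          exact List.take_of_length_le (by simpa using hr)
        rw [pvQuery, if_neg (by omega), htake]
        have hm : pvMaxP [w] = w := by
          simp only [pvMaxP, List.foldl_cons, List.foldl_nil]
          exact max_eq_right hwf
        rw [hm]
    | succ h => exact absurd hwf (by simp [pvWf])
  | node v l rt ihl ihr =>
    cases h with
    | zero => exact absurd hwf (by simp [pvWf])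
    | succ h =>
      obtain ⟨hl, hr, hv⟩ := pvWf_node.mp hwf
      have hlenl : (pvLeaves l).length = 2 ^ h := pvLeaves_length h l hl
      have hlenr : (pvLeaves rt).length = 2 ^ h := pvLeaves_length h rt hr
      have hpow : 2 ^ (h + 1) = 2 ^ h + 2 ^ h := by rw [pow_succ]; ring
      have hh : h + 1 - 1 = h := rfl
      rcases Nat.eq_zero_or_pos r with hr0 | hr0
      · subst hr0; simp [pvQuery, pvMaxP]
      · rw [pvQuery, if_neg (by omega)]
        by_cases hbig : 2 ^ (h + 1) ≤ r
        · rw [if_pos hbig]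
          have htake : (pvLeaves (PvSeg.node v l rt)).take r = pvLeaves (PvSeg.node v l rt) := by
            apply List.take_of_length_le
            rw [pvLeaves_length (h + 1) _ hwf]
            omega
          rw [htake]
          exact pvRoot_eq (h + 1) _ hwf
        · rw [if_neg hbig, hh]
          by_cases hhalf : r ≤ 2 ^ h
          · rw [if_pos hhalf]
            show pvQuery l h r = _
            rw [pvLeaves, List.take_append, hlenl,
              Nat.sub_eq_zero_of_le hhalf, List.take_zero, List.append_nil]
            exact ihl h hl r
          · rw [if_neg hhalf]
            show max (pvRoot l) (pvQuery rt h (r - 2 ^ h)) = _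
            rw [pvLeaves, List.take_append, hlenl,
              List.take_of_length_le (by omega), pvMaxP_append,
              pvRoot_eq h l hl, ihr h hr (r - 2 ^ h)]

-- ----- B's main loop -----

-- the loop invariant: the tree's leaves hold, per compressed location index, the running
-- max of the dp values stored there, and the accumulator holds the running answer
def pvInv (k : Int) (xs : List Int) (d : Nat) (q : List (Int × Int)) (st : PvSeg × Int) : Prop :=
  pvWf d st.1 ∧
  (∀ i, i < 2 ^ d → (pvLeaves st.1).getD i 0
      = pvMaxP ((q.filter (fun e => pvBl xs e.1 = i)).map Prod.snd)) ∧
  st.2 = pvMaxP (q.map Prod.snd)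

lemma pvProcs_mem_fst {k : Int} {s : List (Int × Int)} {e' : Int × Int}
    (h : e' ∈ pvProcs k s) : e'.1 ∈ s.map Prod.fst := by
  have h2 := List.mem_map_of_mem (f := Prod.fst) h
  rwa [pvProcs_fst] at h2

lemma pvStepInv (k : Int) (xs : List Int) (hs : xs.Pairwise (· < ·)) (d : Nat)
    (hd : xs.length ≤ 2 ^ d) (q : List (Int × Int)) (e : Int × Int) (st : PvSeg × Int)
    (hq : ∀ e' ∈ q, e'.1 ∈ xs) (he : e.1 ∈ xs) (hinv : pvInv k xs d q st) :
    pvInv k xs d (pvStep k q e)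
      (pvUpdate st.1 d (pvBl xs e.1) (e.2 + pvQuery st.1 d (pvBl xs (e.1 - k))),
       max st.2 (e.2 + pvQuery st.1 d (pvBl xs (e.1 - k)))) := by
  obtain ⟨hwf, hleaf, hans⟩ := hinv
  have hlen : (pvLeaves st.1).length = 2 ^ d := pvLeaves_length d st.1 hwf
  have hrle : pvBl xs (e.1 - k) ≤ 2 ^ d := le_trans (pvBl_le xs hs _) hd
  have hpos : pvBl xs e.1 < 2 ^ d := lt_of_lt_of_le (pvBl_self xs hs he).1 hd
  -- the prefix-max query returns exactly the reference dp increment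
  have hquery : pvQuery st.1 d (pvBl xs (e.1 - k))
      = pvMaxP ((q.filter (fun x => e.1 - x.1 > k)).map Prod.snd) := by
    rw [pvQuery_eq d st.1 hwf]
    apply pvMaxP_eq_of
    · intro y hy
      rw [List.mem_take_iff_getElem] at hy
      obtain ⟨i, hilt, hyv⟩ := hy
      have hi2 : i < 2 ^ d := by omega
      have hir : i < pvBl xs (e.1 - k) := by omega
      have hyv2 : y = (pvLeaves st.1).getD i 0 := by
        rw [List.getD_eq_getElem _ _ (by omega), hyv]
      rw [hyv2, hleaf i hi2]
      apply pvMaxP_le (pvMaxP_nonneg _)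
      intro z hz
      rw [List.mem_map] at hz
      obtain ⟨e', he', rfl⟩ := hz
      rw [List.mem_filter] at he'
      obtain ⟨he'q, he'i⟩ := he'
      have hbi : pvBl xs e'.1 = i := by simpa using he'i
      apply le_pvMaxP
      rw [List.mem_map]
      refine ⟨e', ?_, rfl⟩
      rw [List.mem_filter]
      refine ⟨he'q, ?_⟩
      have hb := (pvBl_self xs hs (hq e' he'q)).2 (e.1 - k)
      have hlt : e'.1 < e.1 - k := hb.mpr (by omega)
      simp only [decide_eq_true_eq]
      omega
    · intro z hz
      rw [List.mem_map] at hz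
      obtain ⟨e', he', rfl⟩ := hz
      rw [List.mem_filter] at he'
      obtain ⟨he'q, hcond⟩ := he'
      have hcond' : e.1 - e'.1 > k := by simpa using hcond
      have hb := pvBl_self xs hs (hq e' he'q)
      have hi : pvBl xs e'.1 < pvBl xs (e.1 - k) := (hb.2 (e.1 - k)).mp (by omega)
      have h1 : e'.2 ≤ (pvLeaves st.1).getD (pvBl xs e'.1) 0 := by
        rw [hleaf _ (by omega)]
        apply le_pvMaxP
        rw [List.mem_map]
        refine ⟨e', ?_, rfl⟩
        rw [List.mem_filter]
        exact ⟨he'q, by simp⟩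
      refine le_trans h1 ?_
      apply le_pvMaxP
      rw [List.getD_eq_getElem _ _ (by omega), List.mem_take_iff_getElem]
      exact ⟨pvBl xs e'.1, by omega, rfl⟩
  obtain ⟨hwf', hset⟩ := pvUpdate_eq d st.1 hwf (pvBl xs e.1)
    hpos (e.2 + pvQuery st.1 d (pvBl xs (e.1 - k)))
  have hdp : e.2 + pvQuery st.1 d (pvBl xs (e.1 - k))
      = e.2 + pvMaxP ((q.filter (fun x => e.1 - x.1 > k)).map Prod.snd) := by rw [hquery]
  refine ⟨hwf', ?_, ?_⟩
  · intro i hi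
    rw [hset]
    rw [List.getD_eq_getElem _ _ (by rw [List.length_set, hlen]; exact hi), List.getElem_set]
    by_cases hip : pvBl xs e.1 = i
    · rw [if_pos hip]
      have hfil : (pvStep k q e).filter (fun e' => pvBl xs e'.1 = i)
          = q.filter (fun e' => pvBl xs e'.1 = i)
            ++ [(e.1, e.2 + pvMaxP ((q.filter (fun x => e.1 - x.1 > k)).map Prod.snd))] := by
        rw [pvStep, List.filter_append]
        congr 1
        simp [hip]
      rw [hfil]
      simp only [List.map_append, List.map_cons, List.map_nil]
      rw [pvMaxP_concat, hip, hleaf i hi, hquery]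
    · rw [if_neg hip]
      have hfil : (pvStep k q e).filter (fun e' => pvBl xs e'.1 = i)
          = q.filter (fun e' => pvBl xs e'.1 = i) := by
        rw [pvStep, List.filter_append]
        simp [hip]
      rw [hfil, ← List.getD_eq_getElem _ _ (by rw [hlen]; exact hi), hleaf i hi]
  · rw [hans, hdp, pvStep, List.map_append]
    exact (pvMaxP_concat _ _).symm

lemma pvBloop (k : Int) (xs : List Int) (hs : xs.Pairwise (· < ·)) (d : Nat)
    (hd : xs.length ≤ 2 ^ d) (s : List (Int × Int)) :
    (∀ e ∈ s, e.1 ∈ xs) →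
    pvInv k xs d (pvProcs k s) (s.foldl (fun (st : PvSeg × Int) lp =>
        let dp := lp.2 + pvQuery st.1 d (pvBl xs (lp.1 - k))
        let ans := max st.2 dp
        (pvUpdate st.1 d (pvBl xs lp.1) dp, ans)) (pvBuild d, 0)) := by
  induction s using List.reverseRecOn with
  | nil =>
    intro _
    obtain ⟨hw, hl⟩ := pvBuild_wf d
    simp only [List.foldl_nil]
    refine ⟨hw, ?_, by simp [pvProcs, pvMaxP]⟩
    intro i hi
    rw [hl]
    simp [pvProcs, pvMaxP]
  | append_singleton s e ih =>
    intro hmem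
    have hmem' : ∀ e' ∈ s, e'.1 ∈ xs := fun e' he' => hmem e' (List.mem_append_left _ he')
    have hex : e.1 ∈ xs := hmem e (by simp)
    have hq' : ∀ e' ∈ pvProcs k s, e'.1 ∈ xs := by
      intro e' he'
      have h2 := pvProcs_mem_fst he'
      rw [List.mem_map] at h2
      obtain ⟨a, ha, hae⟩ := h2
      rw [← hae]
      exact hmem' a ha
    rw [List.foldl_append, pvProcs_concat]
    simp only [List.foldl_cons, List.foldl_nil]
    exact pvStepInv k xs hs d hd (pvProcs k s) e _ hq' hex (ih hmem')

lemma pvB_eq (locations profits : List Int) (k : Int) :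
    max_total_profit_alt locations profits k =
      (if (locations.zip profits).filter (fun lp => lp.1 ≥ k) = [] then 0
       else pvMaxP ((pvProcs k ((locations.zip profits).filter (fun lp => lp.1 ≥ k))).map Prod.snd)) := by
  simp only [max_total_profit_alt]
  by_cases hemp : (locations.zip profits).filter (fun lp => lp.1 ≥ k) = []
  · rw [if_pos hemp, if_pos hemp]
  · rw [if_neg hemp, if_neg hemp]
    have hs : (PySem.List.sorted (PySem.Set.ofList (((locations.zip profits).filter (fun lp => lp.1 ≥ k)).map Prod.fst)) (fun x => x) false).Pairwise (· < ·) :=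
      PySem.List.sorted_ofList_pairwise_lt _
    have hmem : ∀ e ∈ (locations.zip profits).filter (fun lp => lp.1 ≥ k),
        e.1 ∈ PySem.List.sorted (PySem.Set.ofList (((locations.zip profits).filter (fun lp => lp.1 ≥ k)).map Prod.fst)) (fun x => x) false := by
      intro e he
      rw [PySem.List.mem_sorted, PySem.Set.mem_ofList]
      exact List.mem_map_of_mem he
    exact (pvBloop k _ hs _ (pvDepth_le _ 0) _ hmem).2.2

-- ===== VERDICT (by name: the statement is the Claim_ definition above) =====
theorem max_total_profit_spec : Claim_equal_max_total_profit := by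
  intro locations profits k _ hpre
  unfold Spec_max_total_profit
  rw [pvA_eq locations profits k hpre, pvB_eq locations profits k]
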